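-- pv_equiv track=rewrite | github.com/rdmurugan/agenticdataengineering | src/agents/ingestion/schema_drift_detector.py | _analyze_compatibility
-- ===== SOURCE A (Python) =====
-- from typing import Dict, Any, List, Optional, Set
--
-- def _analyze_compatibility(changes: List[Dict[str, Any]]) -> str:
--     """
--     Analyze schema compatibility based on changes
--     Returns: full, forward, backward, breaking
--     """
--
--     if not changes:
--         return "full"
--
--     has_additions = any(c["change_type"] == "field_added" for c in changes)
--     has_removals = any(c["change_type"] == "field_removed" for c in changes)
--     has_type_changes = any(c["change_type"] == "data_type_changed" for c in changes)
--
--     # Breaking changes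
--     if has_type_changes or has_removals:
--         return "breaking"
--
--     # Only additions - forward compatible
--     if has_additions and not (has_removals or has_type_changes):
--         return "forward"
--
--     return "backward"
-- ===== SOURCE B (Python) =====
-- _RANK = {"field_removed": 3, "data_type_changed": 3, "field_added": 2}
-- _VERDICT = {3: "breaking", 2: "forward", 1: "backward"}
--
-- def _analyze_compatibility(changes):
--     """
--     Analyze schema compatibility based on changes
--     Returns: full, forward, backward, breaking
--     """
--     if not changes:
--         return "full"
--     severity = max(_RANK.get(c["change_type"], 1) for c in changes)
--     return _VERDICT[severity]
-- ===== Notes on version B (the rewrite author's own statement) =====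
-- stated objective: simpler
-- what changed: Replaces the three separate short-circuiting any() scans with a single pass computing the maximum severity rank (3=breaking, 2=forward, 1=backward) via a rank table, then mapping that rank to the verdict.
import Mathlib
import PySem

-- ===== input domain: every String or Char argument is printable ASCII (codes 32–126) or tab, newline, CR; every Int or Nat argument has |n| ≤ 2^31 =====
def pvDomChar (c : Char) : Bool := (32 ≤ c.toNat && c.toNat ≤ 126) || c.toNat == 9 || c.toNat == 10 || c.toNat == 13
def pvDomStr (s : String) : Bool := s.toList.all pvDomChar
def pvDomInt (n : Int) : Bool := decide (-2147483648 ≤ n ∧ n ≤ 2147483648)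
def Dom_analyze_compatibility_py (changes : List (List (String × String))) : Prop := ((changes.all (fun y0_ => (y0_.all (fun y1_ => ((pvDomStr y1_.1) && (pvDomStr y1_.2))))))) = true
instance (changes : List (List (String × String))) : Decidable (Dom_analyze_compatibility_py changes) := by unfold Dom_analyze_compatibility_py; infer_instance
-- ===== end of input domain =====

-- B replaces A's three short-circuiting any() scans by a single max-severity pass over a rank table: simpler, one traversal.
-- Pre_ excludes inputs where some change dict lacks the "change_type" key, on which A raises KeyError
-- (except when all three markers precede the first missing key, where A returns "breaking" but B raises).


-- ===== PORT A =====
-- c["change_type"]: first-match association-list lookup; Pre_ guarantees the key is present,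
-- so the .getD "" default is never consulted on admitted inputs.
def pvCT (c : List (String × String)) : String := (List.lookup "change_type" c).getD ""

def analyze_compatibility_py (changes : List (List (String × String))) : String :=
  if changes.isEmpty then "full"
  else
    let has_additions := changes.any (fun c => pvCT c == "field_added")
    let has_removals := changes.any (fun c => pvCT c == "field_removed")
    let has_type_changes := changes.any (fun c => pvCT c == "data_type_changed")
    if has_type_changes || has_removals then "breaking"
    else if has_additions && !(has_removals || has_type_changes) then "forward"
    else "backward"

-- ===== PORT B =====
-- _RANK.get(t, 1)
def pvRank (t : String) : Nat :=
  if t = "field_removed" then 3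
  else if t = "data_type_changed" then 3
  else if t = "field_added" then 2
  else 1

def analyze_compatibility_py_alt (changes : List (List (String × String))) : String :=
  if changes.isEmpty then "full"
  else
    let severity := changes.foldl (fun m c => max m (pvRank (pvCT c))) 1
    if severity = 3 then "breaking"
    else if severity = 2 then "forward"
    else "backward"

-- ===== PRECONDITION & SPEC =====
-- Pre_ excludes inputs where some change dict lacks the "change_type" key: there A raises KeyError, except
-- when "field_added", "field_removed" and "data_type_changed" all occur before the first missing key
-- (then A returns "breaking"); B raises KeyError on every such input, so these stay outside Pre_.
def Pre_analyze_compatibility_py (changes : List (List (String × String))) : Prop :=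
  changes.all (fun c => (List.lookup "change_type" c).isSome) = true
instance (changes : List (List (String × String))) : Decidable (Pre_analyze_compatibility_py changes) := by unfold Pre_analyze_compatibility_py; infer_instance

def pvWitness_analyze_compatibility_py : (List (List (String × String))) :=
  [[("change_type", "field_added")], [("change_type", "other")]]

def Spec_analyze_compatibility_py (changes : List (List (String × String))) (out : String) : Prop := out = analyze_compatibility_py_alt changes
instance (changes : List (List (String × String))) (out : String) : Decidable (Spec_analyze_compatibility_py changes out) := by unfold Spec_analyze_compatibility_py; infer_instance

-- ===== CLAIM (what is proved, stated in full; the proofs are below) =====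
def Claim_equal_analyze_compatibility_py : Prop := ∀ (changes : List (List (String × String))), Dom_analyze_compatibility_py changes → Pre_analyze_compatibility_py changes → Spec_analyze_compatibility_py changes (analyze_compatibility_py changes)

-- ===== LEMMAS AND PROOFS =====

lemma pvRank_eq_three (t : String) :
    (pvRank t == 3) = (t == "data_type_changed" || t == "field_removed") := by
  unfold pvRank; split_ifs with h1 h2 h3 <;> simp_all

lemma pvRank_eq_two (t : String) :
    (pvRank t == 2) = (t == "field_added") := by
  unfold pvRank; split_ifs with h1 h2 h3 <;> simp_all

lemma any_or_split (l : List (List (String × String))) (f g : List (String × String) → Bool) :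
    l.any (fun c => f c || g c) = (l.any f || l.any g) := by
  induction l with
  | nil => rfl
  | cons c t ih => cases hf : f c <;> cases hg : g c <;> simp [List.any_cons, ih, hf, hg]

lemma fold_sev (l : List (List (String × String))) (m : ℕ) (hm : 1 ≤ m ∧ m ≤ 3) :
    l.foldl (fun a c => max a (pvRank (pvCT c))) m =
      if l.any (fun c => pvRank (pvCT c) == 3) then 3
      else if l.any (fun c => pvRank (pvCT c) == 2) then max m 2
      else m := by
  induction l generalizing m with
  | nil => simp
  | cons c t ih =>
    have hr : 1 ≤ pvRank (pvCT c) ∧ pvRank (pvCT c) ≤ 3 := by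
      unfold pvRank; split_ifs <;> omega
    rw [List.foldl_cons, ih (max m (pvRank (pvCT c))) (by omega)]
    simp only [List.any_cons]
    rcases Nat.lt_or_ge (pvRank (pvCT c)) 2 with h | h
    · have h1 : pvRank (pvCT c) = 1 := by omega
      simp [*]
    rcases Nat.lt_or_ge (pvRank (pvCT c)) 3 with h' | h'
    · have h2 : pvRank (pvCT c) = 2 := by omega
      simp only [h2]
      by_cases h3 : t.any (fun c => pvRank (pvCT c) == 3) = true <;> simp [h3]
    · have h3 : pvRank (pvCT c) = 3 := by omega
      simp [h3]; omega

-- ===== VERDICT (by name: the statement is the Claim_ definition above) =====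
theorem analyze_compatibility_py_spec : Claim_equal_analyze_compatibility_py := by
  intro changes _ _
  unfold Spec_analyze_compatibility_py analyze_compatibility_py analyze_compatibility_py_alt
  by_cases he : changes.isEmpty
  · simp [he]
  simp only [he, Bool.false_eq_true, if_false]
  rw [fold_sev changes 1 (by omega)]
  have h3 : changes.any (fun c => pvRank (pvCT c) == 3)
      = (changes.any (fun c => pvCT c == "data_type_changed") || changes.any (fun c => pvCT c == "field_removed")) := by
    rw [← any_or_split]
    exact congrArg changes.any (funext fun c => pvRank_eq_three (pvCT c))
  have h2 : changes.any (fun c => pvRank (pvCT c) == 2)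
      = changes.any (fun c => pvCT c == "field_added") := by
    exact congrArg changes.any (funext fun c => pvRank_eq_two (pvCT c))
  rw [h3, h2]
  by_cases hA : changes.any (fun c => pvCT c == "data_type_changed") = true <;>
    by_cases hB : changes.any (fun c => pvCT c == "field_removed") = true <;>
      by_cases hC : changes.any (fun c => pvCT c == "field_added") = true <;>
        simp [hA, hB, hC]
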